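-- pv_equiv track=rewrite | github.com/santisesma7/ScoutingApp | src/upcoming_matches_parser.py | split_text_by_leagues
-- ===== SOURCE A (Python) =====
-- def split_text_by_leagues(text: str) -> dict:
--     """
--     Split the full text into sections by league.
--     Looks for patterns like 'bundesliga', 'serie a', 'ligue 1', 'la liga', 'premier league' at start of lines.
--     """
--     leagues_sections = {
--         'Bundesliga': '',
--         'Serie A': '',
--         'Ligue 1': '',
--         'La Liga': '',
--         'Premier League': ''
--     }
--
--     current_league = None
--     for line in text.split('\n'):
--         line_lower = line.lower().strip()
--
--         # Detect league changes
--         if line_lower.startswith('bundesliga'):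
--             current_league = 'Bundesliga'
--         elif 'serie a' in line_lower and 'ahora' in line_lower:
--             current_league = 'Serie A'
--         elif 'ligue 1' in line_lower and 'ahora' in line_lower:
--             current_league = 'Ligue 1'
--         elif ('la liga' in line_lower or 'y por ultimo' in line_lower) and 'liga' in line_lower:
--             current_league = 'La Liga'
--         elif 'premier league' in line_lower or line_lower.startswith('premier'):
--             current_league = 'Premier League'
--
--         if current_league:
--             leagues_sections[current_league] += line + '\n'
--
--     return leagues_sections
-- ===== SOURCE B (Python) =====
-- def split_text_by_leagues(text: str) -> dict:
--     """Two-pass rewrite: label every line with its sticky league, then join per league."""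
--     def detect(low):
--         if low.startswith('bundesliga'):
--             return 'Bundesliga'
--         elif 'serie a' in low and 'ahora' in low:
--             return 'Serie A'
--         elif 'ligue 1' in low and 'ahora' in low:
--             return 'Ligue 1'
--         elif ('la liga' in low or 'y por ultimo' in low) and 'liga' in low:
--             return 'La Liga'
--         elif 'premier league' in low or low.startswith('premier'):
--             return 'Premier League'
--         return None
--
--     lines = text.split('\n')
--     labels = []
--     cur = None
--     for line in lines:
--         d = detect(line.lower().strip())
--         if d is not None:
--             cur = d
--         labels.append(cur)
--     return {lg: ''.join(line + '\n' for line, lab in zip(lines, labels) if lab == lg)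
--             for lg in ('Bundesliga', 'Serie A', 'Ligue 1', 'La Liga', 'Premier League')}
-- ===== Notes on version B (the rewrite author's own statement) =====
-- stated objective: alternative
-- what changed: Replaces the single stateful loop mutating a dict in place by two passes: a labelling pass that tags each line with the current sticky league, then a per-league join of the tagged lines.
import Mathlib
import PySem

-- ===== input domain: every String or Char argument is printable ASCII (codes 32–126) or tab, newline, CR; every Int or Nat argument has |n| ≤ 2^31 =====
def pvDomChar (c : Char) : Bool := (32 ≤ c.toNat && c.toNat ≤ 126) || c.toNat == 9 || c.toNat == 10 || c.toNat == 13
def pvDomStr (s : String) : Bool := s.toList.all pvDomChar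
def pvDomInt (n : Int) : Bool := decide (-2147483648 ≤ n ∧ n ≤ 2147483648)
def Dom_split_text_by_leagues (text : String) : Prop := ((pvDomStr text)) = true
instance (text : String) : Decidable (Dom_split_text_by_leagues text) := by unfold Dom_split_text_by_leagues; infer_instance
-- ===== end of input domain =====

-- B replaces A's stateful dict-mutating loop by a labelling pass plus per-league joins (alternative decomposition, same cost).

-- ===== PORT A =====
-- `leagues_sections[current_league] += line + '\n'` is d[k] = d[k] + (line+'\n'): the key is always
-- one of the five preset keys, so Dict.modify with default "" is exact.  `if current_league:` tests
-- truthiness; current_league is None or one of five nonempty literals, so the Option match is exact.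
def splitA_loop (lines : List String) (cur : Option String)
    (d : PySem.Dict String String) : PySem.Dict String String :=
  match lines with
  | [] => d
  | line :: rest =>
    let low := PySem.Str.strip (PySem.Str.lower line)
    let cur' :=
      if PySem.Str.startswith low "bundesliga" then some "Bundesliga"
      else if PySem.Str.isIn "serie a" low && PySem.Str.isIn "ahora" low then some "Serie A"
      else if PySem.Str.isIn "ligue 1" low && PySem.Str.isIn "ahora" low then some "Ligue 1"
      else if (PySem.Str.isIn "la liga" low || PySem.Str.isIn "y por ultimo" low) && PySem.Str.isIn "liga" low then some "La Liga"
      else if PySem.Str.isIn "premier league" low || PySem.Str.startswith low "premier" then some "Premier League"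
      else cur
    let d' := match cur' with
      | some k => d.modify k "" (fun v => v ++ (line ++ "\n"))
      | none => d
    splitA_loop rest cur' d'

-- text.split('\n'): the separator is the nonempty literal "\n", so split? is always some; getD [] is exact.
def split_text_by_leagues (text : String) : List (String × String) :=
  (splitA_loop ((PySem.Str.split? text "\n").getD []) none
    (PySem.Dict.ofList [("Bundesliga", ""), ("Serie A", ""), ("Ligue 1", ""), ("La Liga", ""), ("Premier League", "")])).items

-- ===== PORT B =====
def detectB (low : String) : Option String :=
  if PySem.Str.startswith low "bundesliga" then some "Bundesliga"
  else if PySem.Str.isIn "serie a" low && PySem.Str.isIn "ahora" low then some "Serie A"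
  else if PySem.Str.isIn "ligue 1" low && PySem.Str.isIn "ahora" low then some "Ligue 1"
  else if (PySem.Str.isIn "la liga" low || PySem.Str.isIn "y por ultimo" low) && PySem.Str.isIn "liga" low then some "La Liga"
  else if PySem.Str.isIn "premier league" low || PySem.Str.startswith low "premier" then some "Premier League"
  else none

def stickyLabels (lines : List String) (cur : Option String) : List (Option String) :=
  match lines with
  | [] => []
  | line :: rest =>
    let c := match detectB (PySem.Str.strip (PySem.Str.lower line)) with
      | some d => some d
      | none => cur
    c :: stickyLabels rest c

def sectionFor (lines : List String) (labels : List (Option String)) (lg : String) : String :=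
  PySem.Str.join "" ((lines.zip labels).filterMap
    (fun p => if p.2 == some lg then some (p.1 ++ "\n") else none))

def split_text_by_leagues_alt (text : String) : List (String × String) :=
  let lines := (PySem.Str.split? text "\n").getD []
  let labels := stickyLabels lines none
  ["Bundesliga", "Serie A", "Ligue 1", "La Liga", "Premier League"].map
    (fun lg => (lg, sectionFor lines labels lg))

-- ===== PRECONDITION & SPEC =====
def Spec_split_text_by_leagues (text : String) (out : List (String × String)) : Prop := out = split_text_by_leagues_alt text
instance (text : String) (out : List (String × String)) : Decidable (Spec_split_text_by_leagues text out) := by unfold Spec_split_text_by_leagues; infer_instance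

-- ===== CLAIM (what is proved, stated in full; the proofs are below) =====
def Claim_equal_split_text_by_leagues : Prop := ∀ (text : String), Dom_split_text_by_leagues text → Spec_split_text_by_leagues text (split_text_by_leagues text)

-- ===== LEMMAS AND PROOFS =====
def mk5 (b s l la p : String) : PySem.Dict String String :=
  PySem.Dict.mk [("Bundesliga", b), ("Serie A", s), ("Ligue 1", l), ("La Liga", la), ("Premier League", p)]

def fiveLabels : List (Option String) :=
  [some "Bundesliga", some "Serie A", some "Ligue 1", some "La Liga", some "Premier League"]

lemma chain_eq (low : String) (cur : Option String) :
    (if PySem.Str.startswith low "bundesliga" then some "Bundesliga"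
      else if PySem.Str.isIn "serie a" low && PySem.Str.isIn "ahora" low then some "Serie A"
      else if PySem.Str.isIn "ligue 1" low && PySem.Str.isIn "ahora" low then some "Ligue 1"
      else if (PySem.Str.isIn "la liga" low || PySem.Str.isIn "y por ultimo" low) && PySem.Str.isIn "liga" low then some "La Liga"
      else if PySem.Str.isIn "premier league" low || PySem.Str.startswith low "premier" then some "Premier League"
      else cur)
    = Option.or (detectB low) cur := by
  unfold detectB; split_ifs <;> rfl

lemma sticky_cons (line : String) (rest : List String) (cur : Option String) :
    stickyLabels (line :: rest) cur
      = Option.or (detectB (PySem.Str.strip (PySem.Str.lower line))) cur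
        :: stickyLabels rest (Option.or (detectB (PySem.Str.strip (PySem.Str.lower line))) cur) := by
  cases h : detectB (PySem.Str.strip (PySem.Str.lower line)) <;> simp [stickyLabels, h, Option.or]

lemma detectB_cases (low : String) : detectB low = none ∨ detectB low ∈ fiveLabels := by
  unfold detectB; split_ifs <;> simp [fiveLabels]

lemma flatten_intersperse_nil (xs : List (List Char)) :
    (List.intersperse ([] : List Char) xs).flatten = xs.flatten := by
  induction xs with
  | nil => rfl
  | cons a r ih => cases r <;> simp_all [List.intersperse]

lemma join_empty_cons (x : String) (xs : List String) :
    PySem.Str.join "" (x :: xs) = x ++ PySem.Str.join "" xs := by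
  simp only [PySem.Str.join, PySem.Chars.join, List.intercalate, List.map]
  rw [show "".toList = ([] : List Char) from rfl, flatten_intersperse_nil, flatten_intersperse_nil,
      List.flatten_cons, String.ofList_append, String.ofList_toList]

lemma sectionFor_nil (cs : List (Option String)) (lg : String) : sectionFor [] cs lg = "" := by
  simp [sectionFor]
  rfl

lemma sectionFor_cons_eq {c : Option String} {lg : String} (h : c = some lg)
    (x : String) (r : List String) (cs : List (Option String)) :
    sectionFor (x :: r) (c :: cs) lg = (x ++ "\n") ++ sectionFor r cs lg := by
  simp only [sectionFor, List.zip_cons_cons, List.filterMap_cons, h, beq_self_eq_true]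
  exact join_empty_cons _ _

lemma sectionFor_cons_ne {c : Option String} {lg : String} (h : ¬ c = some lg)
    (x : String) (r : List String) (cs : List (Option String)) :
    sectionFor (x :: r) (c :: cs) lg = sectionFor r cs lg := by
  simp [sectionFor, h]

lemma modify_mk5_B (b s l la p : String) (f : String → String) :
    (mk5 b s l la p).modify "Bundesliga" "" f = mk5 (f b) s l la p := by
  apply PySem.Dict.ext
  simp [mk5, PySem.Dict.modify, PySem.Dict.items_insert, PySem.Dict.getD_eq_get?_getD,
    PySem.Dict.get?_mk_cons, PySem.Dict.contains_mk]
lemma modify_mk5_S (b s l la p : String) (f : String → String) :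
    (mk5 b s l la p).modify "Serie A" "" f = mk5 b (f s) l la p := by
  apply PySem.Dict.ext
  simp [mk5, PySem.Dict.modify, PySem.Dict.items_insert, PySem.Dict.getD_eq_get?_getD,
    PySem.Dict.get?_mk_cons, PySem.Dict.contains_mk]
lemma modify_mk5_L (b s l la p : String) (f : String → String) :
    (mk5 b s l la p).modify "Ligue 1" "" f = mk5 b s (f l) la p := by
  apply PySem.Dict.ext
  simp [mk5, PySem.Dict.modify, PySem.Dict.items_insert, PySem.Dict.getD_eq_get?_getD,
    PySem.Dict.get?_mk_cons, PySem.Dict.contains_mk]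
lemma modify_mk5_LL (b s l la p : String) (f : String → String) :
    (mk5 b s l la p).modify "La Liga" "" f = mk5 b s l (f la) p := by
  apply PySem.Dict.ext
  simp [mk5, PySem.Dict.modify, PySem.Dict.items_insert, PySem.Dict.getD_eq_get?_getD,
    PySem.Dict.get?_mk_cons, PySem.Dict.contains_mk]
lemma modify_mk5_P (b s l la p : String) (f : String → String) :
    (mk5 b s l la p).modify "Premier League" "" f = mk5 b s l la (f p) := by
  apply PySem.Dict.ext
  simp [mk5, PySem.Dict.modify, PySem.Dict.items_insert, PySem.Dict.getD_eq_get?_getD,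
    PySem.Dict.get?_mk_cons, PySem.Dict.contains_mk]

lemma loop_eq (lines : List String) (cur : Option String)
    (hcur : cur = none ∨ cur ∈ fiveLabels) (b s l la p : String) :
    splitA_loop lines cur (mk5 b s l la p)
      = mk5 (b ++ sectionFor lines (stickyLabels lines cur) "Bundesliga")
            (s ++ sectionFor lines (stickyLabels lines cur) "Serie A")
            (l ++ sectionFor lines (stickyLabels lines cur) "Ligue 1")
            (la ++ sectionFor lines (stickyLabels lines cur) "La Liga")
            (p ++ sectionFor lines (stickyLabels lines cur) "Premier League") := by
  induction lines generalizing cur b s l la p with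
  | nil =>
    simp [splitA_loop, stickyLabels, sectionFor_nil]
  | cons line rest ih =>
    have hor : Option.or (detectB (PySem.Str.strip (PySem.Str.lower line))) cur = none ∨
        Option.or (detectB (PySem.Str.strip (PySem.Str.lower line))) cur ∈ fiveLabels := by
      cases hdet : detectB (PySem.Str.strip (PySem.Str.lower line)) with
      | none => simpa [Option.or] using hcur
      | some d =>
        rcases detectB_cases (PySem.Str.strip (PySem.Str.lower line)) with h | h
        · simp [hdet] at h
        · right; simpa [Option.or, hdet] using h
    rw [sticky_cons]
    simp only [splitA_loop, chain_eq]
    rcases hor with h | h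
    · rw [h]
      rw [sectionFor_cons_ne (by simp), sectionFor_cons_ne (by simp),
          sectionFor_cons_ne (by simp), sectionFor_cons_ne (by simp),
          sectionFor_cons_ne (by simp)]
      exact ih none (Or.inl rfl) b s l la p
    · simp only [fiveLabels, List.mem_cons, List.not_mem_nil, or_false] at h
      rcases h with h | h | h | h | h <;> rw [h] <;>
        simp only [modify_mk5_B, modify_mk5_S, modify_mk5_L, modify_mk5_LL, modify_mk5_P]
      · rw [sectionFor_cons_eq rfl, sectionFor_cons_ne (by decide), sectionFor_cons_ne (by decide),
            sectionFor_cons_ne (by decide), sectionFor_cons_ne (by decide),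
            ih _ (Or.inr (by simp [fiveLabels])) (b ++ (line ++ "\n")) s l la p]
        simp [String.append_assoc]
      · rw [sectionFor_cons_ne (by decide), sectionFor_cons_eq rfl, sectionFor_cons_ne (by decide),
            sectionFor_cons_ne (by decide), sectionFor_cons_ne (by decide),
            ih _ (Or.inr (by simp [fiveLabels])) b (s ++ (line ++ "\n")) l la p]
        simp [String.append_assoc]
      · rw [sectionFor_cons_ne (by decide), sectionFor_cons_ne (by decide), sectionFor_cons_eq rfl,
            sectionFor_cons_ne (by decide), sectionFor_cons_ne (by decide),
            ih _ (Or.inr (by simp [fiveLabels])) b s (l ++ (line ++ "\n")) la p]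
        simp [String.append_assoc]
      · rw [sectionFor_cons_ne (by decide), sectionFor_cons_ne (by decide),
            sectionFor_cons_ne (by decide), sectionFor_cons_eq rfl, sectionFor_cons_ne (by decide),
            ih _ (Or.inr (by simp [fiveLabels])) b s l (la ++ (line ++ "\n")) p]
        simp [String.append_assoc]
      · rw [sectionFor_cons_ne (by decide), sectionFor_cons_ne (by decide),
            sectionFor_cons_ne (by decide), sectionFor_cons_ne (by decide), sectionFor_cons_eq rfl,
            ih _ (Or.inr (by simp [fiveLabels])) b s l la (p ++ (line ++ "\n"))]
        simp [String.append_assoc]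

-- ===== VERDICT (by name: the statement is the Claim_ definition above) =====
theorem split_text_by_leagues_spec : Claim_equal_split_text_by_leagues := by
  intro text _
  unfold Spec_split_text_by_leagues split_text_by_leagues split_text_by_leagues_alt
  have hinit : PySem.Dict.ofList
      [("Bundesliga", ""), ("Serie A", ""), ("Ligue 1", ""), ("La Liga", ""), ("Premier League", "")]
      = mk5 "" "" "" "" "" := by decide
  rw [hinit, loop_eq _ none (Or.inl rfl)]
  simp [mk5, List.map]
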